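-- pv_equiv track=rewrite | github.com/yifan-lee/stanford-cs336-hw1 | support/bpe_tokenize.py | update_encoded_token
-- ===== SOURCE A (Python) =====
-- Pair = tuple[int,int]
--
-- Encoded_Token = tuple[int, ...]
--
-- def update_encoded_token(encoded_token: Encoded_Token, pair: Pair, new_index: int) -> Encoded_Token:
--     result = []
--     i = 0
--     while i < len(encoded_token):
--         if i < len(encoded_token) - 1 and (encoded_token[i], encoded_token[i + 1]) == pair:
--             result.append(new_index)
--             i += 2
--         else:
--             result.append(encoded_token[i])
--             i += 1
--     return tuple(result)
-- ===== SOURCE B (Python) =====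
-- def update_encoded_token(encoded_token, pair, new_index):
--     # consume the tokens as a stack (reversed copy popped from the end),
--     # matching the head against a one-token lookahead
--     rest = list(encoded_token)
--     rest.reverse()
--     out = []
--     while rest:
--         a = rest.pop()
--         if rest and (a, rest[-1]) == pair:
--             rest.pop()
--             out.append(new_index)
--         else:
--             out.append(a)
--     return tuple(out)
-- ===== Notes on version B (the rewrite author's own statement) =====
-- stated objective: alternative
-- what changed: B consumes the tokens as a shrinking stack (a reversed copy popped from the end) with a head-plus-lookahead match, instead of A's index-driven while loop over the immutable tuple with i += 1 / i += 2; it avoids per-step len() calls and repeated indexing.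
import Mathlib
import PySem

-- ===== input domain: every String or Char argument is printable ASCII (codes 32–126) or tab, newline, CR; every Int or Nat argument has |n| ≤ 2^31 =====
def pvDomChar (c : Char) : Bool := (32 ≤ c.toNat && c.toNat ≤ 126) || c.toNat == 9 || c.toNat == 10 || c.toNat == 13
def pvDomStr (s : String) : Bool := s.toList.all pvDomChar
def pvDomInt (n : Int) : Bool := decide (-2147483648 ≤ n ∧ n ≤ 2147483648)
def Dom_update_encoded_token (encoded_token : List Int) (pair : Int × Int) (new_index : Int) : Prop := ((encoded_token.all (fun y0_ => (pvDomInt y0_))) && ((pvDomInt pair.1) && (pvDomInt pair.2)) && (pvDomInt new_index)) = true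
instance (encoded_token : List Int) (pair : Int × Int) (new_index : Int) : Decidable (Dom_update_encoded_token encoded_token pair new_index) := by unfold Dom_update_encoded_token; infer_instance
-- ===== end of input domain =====

-- B consumes the tokens as a shrinking stack (head + one-token lookahead) instead of A's
-- index-driven while loop over the tuple; same cost, alternative structure.

-- ===== PORT A =====
-- A's while loop: index i over encoded_token, result built by append (here: reversed
-- accumulator, reversed at the end). Indexing is always in range, so getD is exact.
def update_encoded_token_go (et : List Int) (pair : Int × Int) (new_index : Int) (i : Nat) (acc : List Int) : List Int :=
  if i < et.length then
    if i + 1 < et.length ∧ et.getD i 0 = pair.1 ∧ et.getD (i+1) 0 = pair.2 then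
      update_encoded_token_go et pair new_index (i+2) (new_index :: acc)
    else
      update_encoded_token_go et pair new_index (i+1) (et.getD i 0 :: acc)
  else acc.reverse
termination_by et.length - i

def update_encoded_token (encoded_token : List Int) (pair : Int × Int) (new_index : Int) : List Int :=
  update_encoded_token_go encoded_token pair new_index 0 []

-- ===== PORT B =====
-- Source B's loop: pop the head of the remaining stack, look ahead one token, emit.
def update_encoded_token_alt_go (pair : Int × Int) (new_index : Int) (out : List Int) : List Int → List Int
  | [] => out.reverse
  | [a] => (a :: out).reverse
  | a :: b :: rest =>
    if a = pair.1 ∧ b = pair.2 then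
      update_encoded_token_alt_go pair new_index (new_index :: out) rest
    else
      update_encoded_token_alt_go pair new_index (a :: out) (b :: rest)

def update_encoded_token_alt (encoded_token : List Int) (pair : Int × Int) (new_index : Int) : List Int :=
  update_encoded_token_alt_go pair new_index [] encoded_token

-- ===== PRECONDITION & SPEC =====
def Spec_update_encoded_token (encoded_token : List Int) (pair : Int × Int) (new_index : Int) (out : List Int) : Prop := out = update_encoded_token_alt encoded_token pair new_index
instance (encoded_token : List Int) (pair : Int × Int) (new_index : Int) (out : List Int) : Decidable (Spec_update_encoded_token encoded_token pair new_index out) := by unfold Spec_update_encoded_token; infer_instance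

-- ===== CLAIM (what is proved, stated in full; the proofs are below) =====
def Claim_equal_update_encoded_token : Prop := ∀ (encoded_token : List Int) (pair : Int × Int) (new_index : Int), Dom_update_encoded_token encoded_token pair new_index → Spec_update_encoded_token encoded_token pair new_index (update_encoded_token encoded_token pair new_index)

-- ===== LEMMAS AND PROOFS =====

theorem update_encoded_token_go_eq_alt (et : List Int) (pair : Int × Int) (new_index : Int) :
    ∀ n i acc, et.length - i ≤ n →
      update_encoded_token_go et pair new_index i acc
        = update_encoded_token_alt_go pair new_index acc (et.drop i) := by
  intro n
  induction n with
  | zero =>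
    intro i acc h
    have hi : et.length ≤ i := by omega
    rw [update_encoded_token_go]
    simp [Nat.not_lt.mpr hi, List.drop_eq_nil_of_le hi, update_encoded_token_alt_go]
  | succ n ih =>
    intro i acc h
    by_cases hi : i < et.length
    · have hne : et.drop i ≠ [] := by
        simp [List.drop_eq_nil_iff]; omega
      rcases hd : et.drop i with _ | ⟨a, t⟩
      · exact absurd hd hne
      · have ha : et.getD i 0 = a := by
          have : (et.drop i)[0]? = et[i + 0]? := List.getElem?_drop
          simp [hd] at this
          simp [List.getD_eq_getElem?_getD, ← this]
        have ht : t = et.drop (i+1) := by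
          have : (et.drop i).tail = et.drop (i+1) := List.tail_drop
          rw [hd] at this
          simpa using this
        rcases t with _ | ⟨b, t'⟩
        · -- last element: i+1 is out of range, the pair cannot match
          have h1 : et.length ≤ i + 1 := by
            have := List.drop_eq_nil_iff.mp ht.symm; omega
          rw [update_encoded_token_go]
          have hcond : ¬ (i + 1 < et.length ∧ et.getD i 0 = pair.1 ∧ et.getD (i+1) 0 = pair.2) := by
            intro hc; omega
          simp only [if_pos hi, if_neg hcond]
          rw [ih (i+1) (et.getD i 0 :: acc) (by omega), ← ht, ha]
          simp [update_encoded_token_alt_go]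
        · have hb : et.getD (i+1) 0 = b := by
            have h0 : (et.drop (i+1))[0]? = et[(i+1) + 0]? := List.getElem?_drop
            rw [← ht] at h0
            simp at h0
            simp [List.getD_eq_getElem?_getD, ← h0]
          have h1 : i + 1 < et.length := by
            have : et.drop (i+1) ≠ [] := by rw [← ht]; simp
            have := List.drop_eq_nil_iff.not.mp this; omega
          have ht' : t' = et.drop (i+2) := by
            have : (et.drop (i+1)).tail = et.drop (i+1+1) := List.tail_drop
            rw [← ht] at this
            simpa [Nat.add_assoc] using this
          rw [update_encoded_token_go]
          simp only [if_pos hi]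
          by_cases hp : a = pair.1 ∧ b = pair.2
          · have hcond : i + 1 < et.length ∧ et.getD i 0 = pair.1 ∧ et.getD (i+1) 0 = pair.2 :=
              ⟨h1, by rw [ha]; exact hp.1, by rw [hb]; exact hp.2⟩
            rw [if_pos hcond, ih (i+2) (new_index :: acc) (by omega), ← ht']
            simp [update_encoded_token_alt_go, if_pos hp]
          · have hcond : ¬ (i + 1 < et.length ∧ et.getD i 0 = pair.1 ∧ et.getD (i+1) 0 = pair.2) := by
              rw [ha, hb]; tauto
            rw [if_neg hcond, ih (i+1) (et.getD i 0 :: acc) (by omega), ← ht, ha]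
            simp [update_encoded_token_alt_go, if_neg hp]
    · rw [update_encoded_token_go]
      simp [hi, List.drop_eq_nil_of_le (Nat.not_lt.mp hi), update_encoded_token_alt_go]

-- ===== VERDICT (by name: the statement is the Claim_ definition above) =====
theorem update_encoded_token_spec : Claim_equal_update_encoded_token := by
  intro et pair ni _
  unfold Spec_update_encoded_token update_encoded_token update_encoded_token_alt
  simpa using update_encoded_token_go_eq_alt et pair ni et.length 0 [] (by omega)
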